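-- pv_equiv track=rewrite | github.com/aaronbae/leetcode | codesignal/practicetest/alternateingsort.py | alternatingSort
-- ===== SOURCE A (Python) =====
-- def alternatingSort(a):
--   prev = -1 * 10**9
--   N = len(a)
--   for i in range(N):
--     val = -1 # temp
--     if i % 2 == 0:
--       val = a[int(i/2)]
--     else:
--       val = a[N-int((i+1)/2)]
--     if val <= prev:
--       return False
--     prev = val
--   return True
-- ===== SOURCE B (Python) =====
-- def alternatingSort(a):
--     # Build the reordered sequence with two pointers, then scan it once for strict increase.
--     b = []
--     lo, hi = 0, len(a) - 1
--     while lo < hi: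
--         b.append(a[lo])
--         b.append(a[hi])
--         lo += 1
--         hi -= 1
--     if lo == hi:
--         b.append(a[lo])
--     prev = -10**9
--     for v in b:
--         if v <= prev:
--             return False
--         prev = v
--     return True
-- ===== Notes on version B (the rewrite author's own statement) =====
-- stated objective: alternative
-- what changed: A fuses the index arithmetic (i//2 vs N-(i+1)//2) and the monotonicity test into one loop over range(N); B first builds the reordered sequence with two pointers walking in from both ends and then scans that list once for strict increase.
import Mathlib
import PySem

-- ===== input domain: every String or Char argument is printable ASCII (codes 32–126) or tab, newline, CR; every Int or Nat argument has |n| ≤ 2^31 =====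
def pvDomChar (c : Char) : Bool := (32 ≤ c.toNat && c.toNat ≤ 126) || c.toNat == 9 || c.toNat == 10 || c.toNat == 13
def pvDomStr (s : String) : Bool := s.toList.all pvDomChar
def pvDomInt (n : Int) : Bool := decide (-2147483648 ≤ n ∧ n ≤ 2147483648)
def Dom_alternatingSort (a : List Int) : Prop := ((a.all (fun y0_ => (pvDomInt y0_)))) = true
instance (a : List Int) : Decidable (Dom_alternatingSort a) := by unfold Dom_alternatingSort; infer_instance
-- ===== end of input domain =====

-- B replaces A's fused index-arithmetic loop by a construct-then-scan decomposition (objective: alternative).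


-- ===== PORT A =====
-- the 'for i in range(N)' loop with early 'return False'; prev is the running previous value.
-- int(i/2) = i//2 exactly here (i ≥ 0 and far below 2^53, so float division is exact);
-- both indices are always in range for i ∈ range(N), so the .getD 0 after pyGet? is unreachable.
def alternatingSortLoop (a : List Int) (N : Int) : List Int → Int → Bool
  | [], _ => true
  | i :: rest, prev =>
    let val : Int :=
      if PySem.Int.mod i 2 = 0 then
        (PySem.List.pyGet? a (PySem.Int.floordiv i 2)).getD 0
      else
        (PySem.List.pyGet? a (N - PySem.Int.floordiv (i + 1) 2)).getD 0
    if val ≤ prev then false else alternatingSortLoop a N rest val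

def alternatingSort (a : List Int) : Bool :=
  alternatingSortLoop a (a.length : Int) (PySem.List.pyRange 0 (a.length : Int) 1) (-1 * 10 ^ 9)

-- ===== PORT B =====
-- the 'while lo < hi' two-pointer build of b; a[lo]/a[hi] are always in range when read,
-- so the pyGetD default 0 is unreachable.
def buildAlt (a : List Int) (lo hi : Int) (b : List Int) : List Int :=
  if lo < hi then
    buildAlt a (lo + 1) (hi - 1) (b ++ [PySem.List.pyGetD a lo 0, PySem.List.pyGetD a hi 0])
  else if lo = hi then b ++ [PySem.List.pyGetD a lo 0]
  else b
termination_by (hi - lo + 1).toNat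
decreasing_by omega

-- the 'for v in b' scan with running prev
def checkInc : List Int → Int → Bool
  | [], _ => true
  | v :: rest, prev => if v ≤ prev then false else checkInc rest v

def alternatingSort_alt (a : List Int) : Bool :=
  checkInc (buildAlt a 0 ((a.length : Int) - 1) []) (-(10 ^ 9))

-- ===== PRECONDITION & SPEC =====
def Spec_alternatingSort (a : List Int) (out : Bool) : Prop := out = alternatingSort_alt a
instance (a : List Int) (out : Bool) : Decidable (Spec_alternatingSort a out) := by unfold Spec_alternatingSort; infer_instance

-- ===== CLAIM (what is proved, stated in full; the proofs are below) =====
def Claim_equal_alternatingSort : Prop := ∀ (a : List Int), Dom_alternatingSort a → Spec_alternatingSort a (alternatingSort a)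

-- ===== LEMMAS AND PROOFS =====

-- proof-side abstraction of the order both programs visit: first, last, recurse on the middle
def seqAlt : List Int → List Int
  | [] => []
  | [x] => [x]
  | x :: y :: rest =>
    x :: (y :: rest).getLast (by simp) :: seqAlt ((y :: rest).dropLast)
termination_by xs => xs.length
decreasing_by simp

-- the value A reads at loop index i
def fval (a : List Int) (i : Nat) : Int :=
  if i % 2 = 0 then a.getD (i / 2) 0 else a.getD (a.length - (i + 1) / 2) 0

theorem loop_eq_check (a : List Int) (l : List Nat) (hl : ∀ i ∈ l, i < a.length) (prev : Int) :
    alternatingSortLoop a (a.length : Int) (l.map (fun (i : Nat) => (i : Int))) prev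
      = checkInc (l.map (fval a)) prev := by
  induction l generalizing prev with
  | nil => rfl
  | cons i t ih =>
    have hi : i < a.length := hl i (by simp)
    have hmod : PySem.Int.mod (i : Int) 2 = ((i % 2 : Nat) : Int) := by
      rw [PySem.Int.mod_eq_emod_of_pos (by norm_num)]; omega
    have hval : (if PySem.Int.mod (i : Int) 2 = 0 then
        (PySem.List.pyGet? a (PySem.Int.floordiv (i : Int) 2)).getD 0
      else
        (PySem.List.pyGet? a ((a.length : Int) - PySem.Int.floordiv ((i : Int) + 1) 2)).getD 0)
        = fval a i := by
      rw [hmod]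
      by_cases h : i % 2 = 0
      · have hdiv : PySem.Int.floordiv (i : Int) 2 = ((i / 2 : Nat) : Int) := by
          rw [PySem.Int.floordiv_eq_ediv_of_pos (by norm_num)]; omega
        rw [if_pos (by exact_mod_cast congrArg (fun (k : Nat) => (k : Int)) h), hdiv, fval,
          if_pos h, PySem.List.pyGet?_natCast, List.getD_eq_getElem?_getD]
      · have h1 : i % 2 = 1 := by omega
        have hdiv : PySem.Int.floordiv ((i : Int) + 1) 2 = (((i + 1) / 2 : Nat) : Int) := by
          rw [PySem.Int.floordiv_eq_ediv_of_pos (by norm_num)]; omega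
        have hsub : (a.length : Int) - (((i + 1) / 2 : Nat) : Int)
            = ((a.length - (i + 1) / 2 : Nat) : Int) := by omega
        rw [if_neg (by omega), hdiv, hsub, fval, if_neg h,
          PySem.List.pyGet?_natCast, List.getD_eq_getElem?_getD]
    simp only [List.map_cons]
    rw [alternatingSortLoop, checkInc]
    simp only [hval]
    split
    · rfl
    · exact ih (fun j hj => hl j (by simp [hj])) _

theorem getD_concat_lt (m : List Int) (z : Int) (j : Nat) (hj : j < m.length) :
    (m ++ [z]).getD j 0 = m.getD j 0 := by
  rw [List.getD_eq_getElem?_getD, List.getD_eq_getElem?_getD, List.getElem?_append_left hj]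

theorem fval_one (x z : Int) (m : List Int) : fval (x :: (m ++ [z])) 1 = z := by
  have hlen : (x :: (m ++ [z])).length - (1 + 1) / 2 = m.length + 1 := by simp
  rw [fval, if_neg (by omega), hlen, List.getD_cons_succ,
    List.getD_eq_getElem?_getD, List.getElem?_concat_length]
  rfl

theorem fval_shift (x z : Int) (m : List Int) (i : Nat) (hi : i < m.length) :
    fval (x :: (m ++ [z])) (i + 2) = fval m i := by
  unfold fval
  by_cases h : i % 2 = 0
  · have hd : (i + 2) / 2 = i / 2 + 1 := by omega
    rw [if_pos (by omega), if_pos h, hd, List.getD_cons_succ, getD_concat_lt m z _ (by omega)]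
  · have h1 : i % 2 = 1 := by omega
    have hlen : (x :: (m ++ [z])).length = m.length + 2 := by simp
    have hd : (x :: (m ++ [z])).length - (i + 2 + 1) / 2 = (m.length - (i + 1) / 2) + 1 := by
      rw [hlen]; omega
    rw [if_neg (by omega), if_neg h, hd, List.getD_cons_succ,
      getD_concat_lt m z _ (by omega)]

theorem seqAlt_cons_concat (x z : Int) (m : List Int) :
    seqAlt (x :: (m ++ [z])) = x :: z :: seqAlt m := by
  cases m with
  | nil => simp [seqAlt]
  | cons b bs =>
    have h1 : (b :: (bs ++ [z])).getLast (by simp) = z :=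
      (List.getLast_congr _ _ (by simp : (b :: (bs ++ [z]) : List Int) = (b :: bs) ++ [z])).trans
        (List.getLast_append_singleton _)
    have h2 : (b :: (bs ++ [z])).dropLast = b :: bs := by
      rw [show (b :: (bs ++ [z]) : List Int) = (b :: bs) ++ [z] by simp]
      exact List.dropLast_concat
    simp only [List.cons_append, seqAlt, h1, h2]

theorem map_fval_concat (x z : Int) (m : List Int) :
    (List.range (m.length + 2)).map (fval (x :: (m ++ [z])))
      = x :: z :: (List.range m.length).map (fval m) := by
  rw [show m.length + 2 = (m.length + 1) + 1 from rfl, List.range_succ_eq_map,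
    List.map_cons, List.map_map, List.range_succ_eq_map, List.map_cons, List.map_map]
  congr 1
  congr 1
  · exact fval_one x z m
  · rw [List.map_eq_map_iff]
    intro i hi
    exact fval_shift x z m i (List.mem_range.mp hi)

theorem seq_eq : ∀ (n : Nat) (a : List Int), a.length = n →
    seqAlt a = (List.range a.length).map (fval a) := by
  intro n
  induction n using Nat.strong_induction_on with
  | _ n ih =>
    intro a ha
    match a with
    | [] => simp [seqAlt]
    | [x] => simp [seqAlt, fval]
    | x :: y :: rest =>
      have hl : (y :: rest : List Int) ≠ [] := by simp
      obtain ⟨m, z, hsplit⟩ : ∃ m z, (y :: rest : List Int) = m ++ [z] :=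
        ⟨(y :: rest).dropLast, (y :: rest).getLast hl, (List.dropLast_append_getLast hl).symm⟩
      have hsplit' : (x :: y :: rest : List Int) = x :: (m ++ [z]) := by rw [hsplit]
      have hmlen : m.length = rest.length := by
        have := congrArg List.length hsplit
        simpa using this.symm
      have hn : n = rest.length + 2 := by simpa using ha.symm
      have hrec : seqAlt m = (List.range m.length).map (fval m) :=
        ih m.length (by omega) m rfl
      have hlen2 : (x :: (m ++ [z])).length = m.length + 2 := by simp
      rw [hsplit', seqAlt_cons_concat, hrec, hlen2, map_fval_concat]

theorem pyGetD_toNat (a : List Int) (i : Int) (h0 : 0 ≤ i) :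
    PySem.List.pyGetD a i 0 = a.getD i.toNat 0 := by
  have h := PySem.List.pyGetD_natCast (xs := a) (n := i.toNat) (d := 0)
  rw [show ((i.toNat : Nat) : Int) = i from by omega] at h
  exact h

theorem take_one_seg (a : List Int) (i : Nat) (h : i < a.length) :
    (a.drop i).take 1 = [a.getD i 0] := by
  rw [List.drop_eq_getElem_cons h, List.take_succ_cons, List.take_zero]
  simp [List.getD_eq_getElem?_getD, List.getElem?_eq_getElem h]

theorem seg_decomp (a : List Int) (i j : Nat) (hij : i < j) (hj : j < a.length) :
    (a.drop i).take (j - i + 1)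
      = a.getD i 0 :: ((a.drop (i + 1)).take (j - i - 1) ++ [a.getD j 0]) := by
  rw [List.drop_eq_getElem_cons (by omega), List.take_succ_cons]
  congr 1
  · simp [List.getD_eq_getElem?_getD, List.getElem?_eq_getElem (by omega : i < a.length)]
  rw [show j - i = (j - i - 1) + 1 from by omega, List.take_add_one, List.getElem?_drop,
    show i + 1 + (j - i - 1) = j from by omega, List.getElem?_eq_getElem hj]
  simp [List.getD_eq_getElem?_getD, List.getElem?_eq_getElem hj]

theorem buildAlt_eq : ∀ (k : Nat) (a : List Int) (lo hi : Int) (b : List Int),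
    0 ≤ lo → hi < (a.length : Int) → (hi - lo + 1).toNat = k →
    buildAlt a lo hi b = b ++ seqAlt ((a.drop lo.toNat).take (hi - lo + 1).toNat) := by
  intro k
  induction k using Nat.strong_induction_on with
  | _ k ih =>
    intro a lo hi b hlo hhi hk
    by_cases hlt : lo < hi
    · unfold buildAlt
      rw [if_pos hlt,
        ih ((hi - 1) - (lo + 1) + 1).toNat (by omega) a (lo + 1) (hi - 1) _ (by omega)
          (by omega) rfl,
        pyGetD_toNat a lo hlo, pyGetD_toNat a hi (by omega),
        show (lo + 1).toNat = lo.toNat + 1 from by omega,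
        show ((hi - 1) - (lo + 1) + 1).toNat = hi.toNat - lo.toNat - 1 from by omega,
        show (hi - lo + 1).toNat = hi.toNat - lo.toNat + 1 from by omega,
        seg_decomp a lo.toNat hi.toNat (by omega) (by omega), seqAlt_cons_concat]
      simp
    · by_cases heq : lo = hi
      · unfold buildAlt
        rw [if_neg hlt, if_pos heq, pyGetD_toNat a lo hlo,
          show (hi - lo + 1).toNat = 1 from by omega,
          take_one_seg a lo.toNat (by omega)]
        simp [seqAlt]
      · unfold buildAlt
        rw [if_neg hlt, if_neg heq, show (hi - lo + 1).toNat = 0 from by omega]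
        simp [seqAlt]

theorem buildAlt_all (a : List Int) :
    buildAlt a 0 ((a.length : Int) - 1) [] = seqAlt a := by
  rw [buildAlt_eq ((a.length : Int) - 1 - 0 + 1).toNat a 0 ((a.length : Int) - 1) [] le_rfl
    (by omega) rfl,
    show ((a.length : Int) - 1 - 0 + 1).toNat = a.length from by omega]
  simp

-- ===== VERDICT (by name: the statement is the Claim_ definition above) =====
theorem alternatingSort_spec : Claim_equal_alternatingSort := by
  intro a _
  unfold Spec_alternatingSort alternatingSort alternatingSort_alt
  rw [buildAlt_all, PySem.List.pyRange_zero_natCast,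
    loop_eq_check a (List.range a.length) (fun i hi => List.mem_range.mp hi),
    ← seq_eq a.length a rfl]
  norm_num
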